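-- pv_equiv track=rewrite | github.com/chhaewxn/Algorithm-Study | 프로그래머스/2/87390. n＾2 배열 자르기/n＾2 배열 자르기.py | solution
-- ===== SOURCE A (Python) =====
-- def solution(n, left, right):
--     # 큰 n 값에 대해서는 전체 배열을 만들지 않고 필요한 값만 계산
--
--     # 결과 배열
--     result = []
--
--     # left부터 right까지만 계산
--     for idx in range(left, right + 1):
--         # 1차원 인덱스를 2차원 좌표로 변환
--         row = idx // n  # 행 번호
--         col = idx % n   # 열 번호
--
--         value = max(row + 1, col + 1)
--         result.append(value)
--
--     return result
-- ===== SOURCE B (Python) =====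
-- def row_seg(n, r, lo, hi):
--     # values in row r, columns lo..hi: a plateau of r+1 up to column r, then ascending col+1
--     plateau_end = min(hi, r)
--     seg = [r + 1] * (plateau_end - lo + 1) if lo <= plateau_end else []
--     return seg + list(range(max(lo, r + 1) + 1, hi + 2))
--
-- def solution(n, left, right):
--     if left > right:
--         return []
--     r0, c0 = divmod(left, n)
--     r1, c1 = divmod(right, n)
--     if r0 == r1:
--         return row_seg(n, r0, c0, c1)
--     out = row_seg(n, r0, c0, n - 1)
--     for r in range(r0 + 1, r1):
--         out += row_seg(n, r, 0, n - 1)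
--     out += row_seg(n, r1, 0, c1)
--     return out
-- ===== Notes on version B (the rewrite author's own statement) =====
-- stated objective: alternative
-- what changed: B walks the slice row by row and emits each row as two bulk runs (a replicated plateau of r+1, then an ascending range of column+1), instead of computing max(idx//n+1, idx%n+1) separately for every flat index; the bulk list ops often help in CPython but the gain is shape-dependent.
-- outside the precondition, e.g. on solution(-2, 0, 2): A returns [1, 0, 1], B returns [1]
import Mathlib
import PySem

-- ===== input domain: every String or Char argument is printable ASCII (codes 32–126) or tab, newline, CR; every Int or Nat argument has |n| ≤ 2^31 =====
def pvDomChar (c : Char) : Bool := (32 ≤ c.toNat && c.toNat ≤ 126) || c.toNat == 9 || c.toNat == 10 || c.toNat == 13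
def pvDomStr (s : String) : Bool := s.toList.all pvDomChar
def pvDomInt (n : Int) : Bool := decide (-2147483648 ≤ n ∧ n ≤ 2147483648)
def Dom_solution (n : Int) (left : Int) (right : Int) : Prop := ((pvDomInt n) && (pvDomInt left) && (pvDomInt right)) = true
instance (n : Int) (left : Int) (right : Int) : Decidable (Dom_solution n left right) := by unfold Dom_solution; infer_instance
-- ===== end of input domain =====

-- B emits each row of the slice as a replicated plateau plus an ascending range instead of
-- a per-index max formula (an alternative, row-run decomposition using bulk list operations).


-- ===== PORT A =====
def solution (n : Int) (left : Int) (right : Int) : List Int :=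
  (PySem.List.pyRange left (right + 1) 1).foldl
    (fun result idx =>
      let row := PySem.Int.floordiv idx n
      let col := PySem.Int.mod idx n
      result ++ [max (row + 1) (col + 1)]) []

-- ===== PORT B =====
-- row_seg(n, r, lo, hi): plateau of r+1 on columns lo..min(hi,r), then ascending col+1
def rowSeg (n : Int) (r : Int) (lo : Int) (hi : Int) : List Int :=
  (if lo ≤ min hi r then List.replicate (min hi r - lo + 1).toNat (r + 1) else [])
    ++ PySem.List.pyRange (max lo (r + 1) + 1) (hi + 2) 1

def solution_alt (n : Int) (left : Int) (right : Int) : List Int :=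
  if left > right then []
  else
    let r0 := PySem.Int.floordiv left n
    let c0 := PySem.Int.mod left n
    let r1 := PySem.Int.floordiv right n
    let c1 := PySem.Int.mod right n
    if r0 == r1 then rowSeg n r0 c0 c1
    else
      ((PySem.List.pyRange (r0 + 1) r1 1).foldl
          (fun out r => out ++ rowSeg n r 0 (n - 1)) (rowSeg n r0 c0 (n - 1)))
        ++ rowSeg n r1 0 c1

-- ===== PRECONDITION & SPEC =====
-- Pre_ restricts to the natural domain n ≥ 1 (n is the square array's dimension), keeping the
-- empty slice right < left for every n: for n = 0 with left ≤ right A raises ZeroDivisionError,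
-- and for negative n with a nonempty slice A's floor-division values are accidental (excluded
-- example in the claim's cites).
def Pre_solution (n : Int) (left : Int) (right : Int) : Prop := 1 ≤ n ∨ right < left
instance (n : Int) (left : Int) (right : Int) : Decidable (Pre_solution n left right) := by
  unfold Pre_solution; infer_instance
def pvWitness_solution : Int × Int × Int := (3, 2, 7)
def Spec_solution (n : Int) (left : Int) (right : Int) (out : List Int) : Prop := out = solution_alt n left right
instance (n : Int) (left : Int) (right : Int) (out : List Int) : Decidable (Spec_solution n left right out) := by unfold Spec_solution; infer_instance

-- ===== CLAIM (what is proved, stated in full; the proofs are below) =====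
def Claim_equal_solution : Prop := ∀ (n : Int) (left : Int) (right : Int), Dom_solution n left right → Pre_solution n left right → Spec_solution n left right (solution n left right)

-- ===== LEMMAS AND PROOFS =====

-- the per-index value A computes
def pvF (n : Int) (idx : Int) : Int :=
  max (PySem.Int.floordiv idx n + 1) (PySem.Int.mod idx n + 1)

theorem solution_eq_map (n left right : Int) :
    solution n left right = (PySem.List.pyRange left (right + 1) 1).map (pvF n) := by
  unfold solution pvF
  exact (PySem.List.foldl_append_singleton_eq_map _ _ []).trans (List.nil_append _)

theorem rowSeg_nil (n r lo hi : Int) (h : hi < lo) : rowSeg n r lo hi = [] := by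
  unfold rowSeg
  rw [if_neg (by omega), PySem.List.pyRange_one_eq_nil (by omega)]
  rfl

theorem rowSeg_cons (n r lo hi : Int) (h : lo ≤ hi) :
    rowSeg n r lo hi = max (r + 1) (lo + 1) :: rowSeg n r (lo + 1) hi := by
  unfold rowSeg
  by_cases hr : lo ≤ r
  · rw [if_pos (by omega)]
    have h1 : (min hi r - lo + 1).toNat = (min hi r - (lo + 1) + 1).toNat + 1 := by omega
    rw [h1, List.replicate_succ]
    have hmax : max (r + 1) (lo + 1) = r + 1 := by omega
    have hmax2 : max lo (r + 1) = r + 1 := by omega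
    have hmax3 : max (lo + 1) (r + 1) = r + 1 := by omega
    by_cases h2 : lo + 1 ≤ min hi r
    · rw [if_pos h2, hmax, hmax2, hmax3]; rfl
    · rw [if_neg h2, hmax, hmax2, hmax3]
      have : (min hi r - (lo + 1) + 1).toNat = 0 := by omega
      rw [this]; rfl
  · rw [if_neg (by omega), if_neg (by omega)]
    have hmax : max lo (r + 1) = lo := by omega
    have hmax2 : max (lo + 1) (r + 1) = lo + 1 := by omega
    have hmax3 : max (r + 1) (lo + 1) = lo + 1 := by omega
    rw [hmax, hmax2, hmax3, PySem.List.pyRange_one_cons (by omega)]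
    rfl

theorem pvF_row (n r c : Int) (hn : 1 ≤ n) (h0 : 0 ≤ c) (hc : c < n) :
    pvF n (r * n + c) = max (r + 1) (c + 1) := by
  have hd : PySem.Int.floordiv (r * n + c) n = r := by
    rw [PySem.Int.floordiv_eq_iff_of_pos (by omega)]
    constructor <;> nlinarith
  have hm : PySem.Int.mod (r * n + c) n = c := by
    have := PySem.Int.floordiv_mul_add_mod (r * n + c) n
    rw [hd] at this; omega
  unfold pvF; rw [hd, hm]

theorem rowSeg_eq_map (n : Int) (hn : 1 ≤ n) :
    ∀ (k : Nat) (r lo hi : Int), 0 ≤ lo → hi < n → (hi + 1 - lo).toNat = k →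
      rowSeg n r lo hi = (PySem.List.pyRange (r * n + lo) (r * n + hi + 1) 1).map (pvF n) := by
  intro k
  induction k with
  | zero =>
    intro r lo hi h0 hc hk
    rw [rowSeg_nil n r lo hi (by omega), PySem.List.pyRange_one_eq_nil (by omega)]
    rfl
  | succ k ih =>
    intro r lo hi h0 hc hk
    have hlh : lo ≤ hi := by omega
    rw [rowSeg_cons n r lo hi hlh, PySem.List.pyRange_one_cons (by omega), List.map_cons,
      pvF_row n r lo hn h0 (by omega)]
    have : r * n + lo + 1 = r * n + (lo + 1) := by ring
    rw [this, ih r (lo + 1) hi (by omega) hc (by omega)]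

theorem fold_rows_eq_map (n : Int) (hn : 1 ≤ n) :
    ∀ (k : Nat) (a b : Int) (init : List Int), (b - a).toNat = k →
      (PySem.List.pyRange a b 1).foldl (fun out r => out ++ rowSeg n r 0 (n - 1)) init
        = init ++ (PySem.List.pyRange (a * n) (b * n) 1).map (pvF n) := by
  intro k
  induction k with
  | zero =>
    intro a b init hk
    have hba : b ≤ a := by omega
    rw [PySem.List.pyRange_one_eq_nil (by omega),
      PySem.List.pyRange_one_eq_nil (by nlinarith)]
    simp
  | succ k ih =>
    intro a b init hk
    rw [PySem.List.pyRange_one_cons (by omega), List.foldl_cons,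
      ih (a + 1) b (init ++ rowSeg n a 0 (n - 1)) (by omega)]
    have hseg : rowSeg n a 0 (n - 1)
        = (PySem.List.pyRange (a * n) ((a + 1) * n) 1).map (pvF n) := by
      have := rowSeg_eq_map n hn (n - 1 + 1 - 0).toNat a 0 (n - 1) (by omega) (by omega) rfl
      rw [this]
      congr 1
      · congr 1 <;> ring
    have hab : a + 1 ≤ b := by omega
    rw [hseg, List.append_assoc, ← List.map_append,
      ← PySem.List.pyRange_one_append (a * n) ((a + 1) * n) (b * n) (by nlinarith)
        (by nlinarith [hab, hn])]

-- ===== VERDICT (by name: the statement is the Claim_ definition above) =====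
theorem solution_spec : Claim_equal_solution := by
  intro n left right _ hpre
  unfold Spec_solution
  rw [solution_eq_map]
  unfold solution_alt
  by_cases hlr : left > right
  · rw [if_pos hlr, PySem.List.pyRange_one_eq_nil (by omega)]
    rfl
  · have hn : 1 ≤ n := by
      rcases hpre with h | h
      · exact h
      · omega
    rw [if_neg hlr]
    push Not at hlr
    set r0 := PySem.Int.floordiv left n with hr0
    set c0 := PySem.Int.mod left n with hc0
    set r1 := PySem.Int.floordiv right n with hr1
    set c1 := PySem.Int.mod right n with hc1
    have hleft : r0 * n + c0 = left := by
      have := PySem.Int.floordiv_mul_add_mod left n; omega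
    have hright : r1 * n + c1 = right := by
      have := PySem.Int.floordiv_mul_add_mod right n; omega
    have hc0b : 0 ≤ c0 ∧ c0 < n :=
      ⟨PySem.Int.mod_nonneg left (by omega), PySem.Int.mod_lt left (by omega)⟩
    have hc1b : 0 ≤ c1 ∧ c1 < n :=
      ⟨PySem.Int.mod_nonneg right (by omega), PySem.Int.mod_lt right (by omega)⟩
    have hr01 : r0 ≤ r1 := by
      by_contra hcon
      push Not at hcon
      have h1 : r1 + 1 ≤ r0 := by omega
      have h2 : (r1 + 1) * n ≤ r0 * n := by nlinarith
      nlinarith [hc0b.1, hc1b.2]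
    by_cases heq : r0 = r1
    · rw [if_pos (by simpa using heq)]
      have hrn : r0 * n = r1 * n := by rw [heq]
      rw [rowSeg_eq_map n hn (c1 + 1 - c0).toNat r0 c0 c1 hc0b.1 hc1b.2 rfl]
      congr 2
      · omega
      · rw [← heq] at hright; omega
    · rw [if_neg (by simpa using heq)]
      have hr01' : r0 + 1 ≤ r1 := by omega
      rw [fold_rows_eq_map n hn (r1 - (r0 + 1)).toNat (r0 + 1) r1 _ rfl]
      rw [rowSeg_eq_map n hn (n - 1 + 1 - c0).toNat r0 c0 (n - 1) hc0b.1 (by omega) rfl,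
        rowSeg_eq_map n hn (c1 + 1 - 0).toNat r1 0 c1 (by omega) hc1b.2 rfl]
      have e1 : r0 * n + (n - 1) + 1 = (r0 + 1) * n := by ring
      have e2 : r1 * n + 0 = r1 * n := by ring
      have e3 : r1 * n + c1 + 1 = right + 1 := by omega
      rw [e1, e2, e3, hleft, List.append_assoc, ← List.map_append, ← List.map_append,
        ← PySem.List.pyRange_one_append ((r0 + 1) * n) (r1 * n) (right + 1)
          (by nlinarith) (by nlinarith [hc1b.1]),
        ← PySem.List.pyRange_one_append left ((r0 + 1) * n) (right + 1)
          (by nlinarith [hc0b.2]) (by nlinarith [hc1b.1, hr01'])]
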